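-- pv_equiv track=rewrite | github.com/Danilll85/Git_IGI_Rename | IGI/LR3/Task4.py | countWordsWithMaxLen
-- ===== SOURCE A (Python) =====
-- def countWordsWithMaxLen(str1: str):
--     maxLetters = 0
--     countofWords = 0
--
--     str1 = str1.split(" ")
--
--     for i in range(len(str1)):
--         if maxLetters < len(str1[i]):
--             maxLetters = len(str1[i])
--         else:
--             continue
--
--     for i in range(len(str1)):
--         if maxLetters == len(str1[i]):
--             countofWords += 1
--         else:
--             continue
--
--     return countofWords
-- ===== SOURCE B (Python) =====
-- def countWordsWithMaxLen(str1: str):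
--     maxLen = 0
--     count = 0
--     for word in str1.split(" "):
--         L = len(word)
--         if L > maxLen:
--             maxLen = L
--             count = 1
--         elif L == maxLen:
--             count += 1
--     return count
-- ===== Notes on version B (the rewrite author's own statement) =====
-- stated objective: simpler
-- what changed: A's two index loops (find the max word length, then count words of that length) are fused into a single pass over the words that tracks the running maximum and resets/increments the count as it goes.
import Mathlib
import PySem

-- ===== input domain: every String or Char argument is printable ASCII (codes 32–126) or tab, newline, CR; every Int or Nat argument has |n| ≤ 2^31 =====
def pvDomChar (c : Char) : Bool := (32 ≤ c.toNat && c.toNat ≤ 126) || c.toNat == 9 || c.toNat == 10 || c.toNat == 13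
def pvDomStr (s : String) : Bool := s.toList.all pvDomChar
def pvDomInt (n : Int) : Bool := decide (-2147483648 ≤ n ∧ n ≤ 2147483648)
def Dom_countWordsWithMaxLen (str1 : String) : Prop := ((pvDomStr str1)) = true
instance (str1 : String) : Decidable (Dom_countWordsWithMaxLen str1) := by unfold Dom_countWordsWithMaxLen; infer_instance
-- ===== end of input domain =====

-- B fuses A's two passes (find max word length, then count matches) into one pass
-- tracking a running maximum and count; same return value, different decomposition.


-- ===== PORT A =====
-- str1.split(" ") with the literal nonempty separator: split? never returns none, .getD [] only makes it total
def countWordsWithMaxLen (str1 : String) : Int :=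
  let words := (PySem.Str.split? str1 " ").getD []
  let maxLetters : Int :=
    (PySem.List.pyRange 0 (PySem.List.len words) 1).foldl
      (fun maxL i =>
        if maxL < PySem.Str.len (PySem.List.pyGetD words i "") then
          PySem.Str.len (PySem.List.pyGetD words i "")
        else maxL) 0
  (PySem.List.pyRange 0 (PySem.List.len words) 1).foldl
    (fun c i =>
      if maxLetters = PySem.Str.len (PySem.List.pyGetD words i "") then c + 1 else c) 0

-- ===== PORT B =====
def countWordsWithMaxLen_alt (str1 : String) : Int :=
  (((PySem.Str.split? str1 " ").getD []).foldl
    (fun (p : Int × Int) w =>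
      let L := PySem.Str.len w
      if p.1 < L then (L, 1)
      else if L = p.1 then (p.1, p.2 + 1)
      else p) (0, 0)).2

-- ===== PRECONDITION & SPEC =====
def Spec_countWordsWithMaxLen (str1 : String) (out : Int) : Prop := out = countWordsWithMaxLen_alt str1
instance (str1 : String) (out : Int) : Decidable (Spec_countWordsWithMaxLen str1 out) := by unfold Spec_countWordsWithMaxLen; infer_instance

-- ===== CLAIM (what is proved, stated in full; the proofs are below) =====
def Claim_equal_countWordsWithMaxLen : Prop := ∀ (str1 : String), Dom_countWordsWithMaxLen str1 → Spec_countWordsWithMaxLen str1 (countWordsWithMaxLen str1)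

-- ===== LEMMAS AND PROOFS =====

-- A's first loop, as a fold over the word list, for an arbitrary length function f
def pvMax (f : String → Int) (ws : List String) (m : Int) : Int :=
  ws.foldl (fun maxL w => if maxL < f w then f w else maxL) m

lemma le_pvMax (f : String → Int) (ws : List String) (m : Int) : m ≤ pvMax f ws m := by
  induction ws generalizing m with
  | nil => simp [pvMax]
  | cons w ws ih =>
    show m ≤ pvMax f ws (if m < f w then f w else m)
    split_ifs with h
    · exact le_of_lt (lt_of_lt_of_le h (ih _))
    · exact ih m

-- A's second loop counts the words whose f-value is M
lemma cntFold (f : String → Int) (M : Int) (ws : List String) (c : Int) :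
    ws.foldl (fun c w => if M = f w then c + 1 else c) c
      = c + ((ws.countP (fun w => f w == M) : Nat) : Int) := by
  induction ws generalizing c with
  | nil => simp
  | cons w ws ih =>
    simp only [List.foldl_cons, List.countP_cons]
    by_cases h : M = f w
    · have hb : (f w == M) = true := beq_iff_eq.mpr h.symm
      rw [if_pos h, ih]; simp [hb]; ring
    · have hb : (f w == M) = false := beq_eq_false_iff_ne.mpr (fun he => h he.symm)
      rw [if_neg h, ih]; simp [hb]

-- B's fused fold computes (overall max, count of words at that max)
lemma fusedFold (f : String → Int) (ws : List String) (m c : Int) :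
    ws.foldl (fun (p : Int × Int) w =>
        if p.1 < f w then (f w, 1) else if f w = p.1 then (p.1, p.2 + 1) else p) (m, c)
      = (pvMax f ws m,
         (if pvMax f ws m = m then c else 0)
           + ((ws.countP (fun w => f w == pvMax f ws m) : Nat) : Int)) := by
  induction ws generalizing m c with
  | nil => simp [pvMax]
  | cons w ws ih =>
    have hstep : ∀ x, pvMax f (w :: ws) x = pvMax f ws (if x < f w then f w else x) := fun _ => rfl
    simp only [List.foldl_cons, List.countP_cons, hstep]
    by_cases h1 : m < f w
    · simp only [if_pos h1]
      rw [ih (f w) 1]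
      have hge := le_pvMax f ws (f w)
      have hne : ¬ pvMax f ws (f w) = m := by omega
      rw [Prod.mk.injEq]
      refine ⟨rfl, ?_⟩
      rw [if_neg hne]
      by_cases h3 : pvMax f ws (f w) = f w
      · have hb : (f w == pvMax f ws (f w)) = true := beq_iff_eq.mpr h3.symm
        rw [if_pos h3]; simp [hb]; ring
      · have hb : (f w == pvMax f ws (f w)) = false := beq_eq_false_iff_ne.mpr (fun he => h3 he.symm)
        rw [if_neg h3]; simp [hb]
    · simp only [if_neg h1]
      by_cases h2 : f w = m
      · simp only [if_pos h2]
        rw [ih m (c + 1), Prod.mk.injEq]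
        refine ⟨rfl, ?_⟩
        by_cases h3 : pvMax f ws m = m
        · have hb : (f w == pvMax f ws m) = true := beq_iff_eq.mpr (by rw [h2, h3])
          rw [if_pos h3, if_pos h3]; simp [hb]; ring
        · have hb : (f w == pvMax f ws m) = false :=
            beq_eq_false_iff_ne.mpr (by rw [h2]; exact fun he => h3 he.symm)
          rw [if_neg h3, if_neg h3]; simp [hb]
      · simp only [if_neg h2]
        rw [ih m c, Prod.mk.injEq]
        refine ⟨rfl, ?_⟩
        have hge := le_pvMax f ws m
        have h4 : ¬ (f w = pvMax f ws m) := by intro he; omega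
        have hb : (f w == pvMax f ws m) = false := beq_eq_false_iff_ne.mpr h4
        simp [hb]

-- ===== VERDICT (by name: the statement is the Claim_ definition above) =====
theorem countWordsWithMaxLen_spec : Claim_equal_countWordsWithMaxLen := by
  intro str1 _
  show countWordsWithMaxLen str1 = countWordsWithMaxLen_alt str1
  unfold countWordsWithMaxLen countWordsWithMaxLen_alt
  simp only []
  set ws := (PySem.Str.split? str1 " ").getD [] with hws
  rw [show ((PySem.List.pyRange 0 (PySem.List.len ws) 1).foldl
        (fun maxL i =>
          if maxL < PySem.Str.len (PySem.List.pyGetD ws i "") then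
            PySem.Str.len (PySem.List.pyGetD ws i "")
          else maxL) 0)
      = ws.foldl (fun maxL w => if maxL < PySem.Str.len w then PySem.Str.len w else maxL) 0 from
    PySem.List.foldl_pyRange_zero_pyGetD ws ""
      (fun maxL w => if maxL < PySem.Str.len w then PySem.Str.len w else maxL) 0]
  rw [show (ws.foldl (fun maxL w => if maxL < PySem.Str.len w then PySem.Str.len w else maxL) 0)
      = pvMax PySem.Str.len ws 0 from rfl]
  rw [PySem.List.foldl_pyRange_zero_pyGetD ws ""
      (fun c w => if pvMax PySem.Str.len ws 0 = PySem.Str.len w then c + 1 else c) 0]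
  rw [cntFold PySem.Str.len (pvMax PySem.Str.len ws 0) ws 0]
  rw [show (ws.foldl
      (fun (p : Int × Int) w =>
        let L := PySem.Str.len w
        if p.1 < L then (L, 1) else if L = p.1 then (p.1, p.2 + 1) else p) (0, 0))
      = ws.foldl (fun (p : Int × Int) w =>
          if p.1 < PySem.Str.len w then (PySem.Str.len w, 1)
          else if PySem.Str.len w = p.1 then (p.1, p.2 + 1) else p) (0, 0) from rfl]
  rw [fusedFold PySem.Str.len ws 0 0]
  split_ifs <;> simp
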